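-- pv_equiv track=rewrite | github.com/sean-galloway/RTLDesignSherpa | bin/trim_wavedrom.py | analyze_signal_activity
-- ===== SOURCE A (Python) =====
-- def analyze_signal_activity(wave_string):
--     """Analyze a wave string to find first and last activity
--
--     Args:
--         wave_string: WaveDrom wave notation string
--
--     Returns:
--         (first_active, last_active) - cycle indices, or (None, None) if no activity
--     """
--     if not wave_string or len(wave_string) == 0:
--         return None, None
--
--     first_char = wave_string[0]
--     first_active = None
--     last_active = None
--
--     for i, char in enumerate(wave_string):
--         # Activity = any change from initial character (except '.' for clocks)
--         if char != first_char and char != '.':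
--             if first_active is None:
--                 first_active = i
--             last_active = i
--         # For clocks, transitions count as activity
--         elif char == 'p' or char == 'n' or char == 'P' or char == 'N':
--             if first_active is None:
--                 first_active = i
--             last_active = i
--
--     return first_active, last_active
-- ===== SOURCE B (Python) =====
-- def analyze_signal_activity(wave_string):
--     """Analyze a wave string to find first and last activity
--
--     Returns (first_active, last_active) cycle indices, or (None, None) if no activity.
--     """
--     if not wave_string:
--         return None, None
--
--     first_char = wave_string[0]
--
--     def active(c):
--         return (c != first_char and c != '.') or c in 'pnPN'
--
--     n = len(wave_string)
--     first_active = next((i for i, c in enumerate(wave_string) if active(c)), None)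
--     last_active = next((n - 1 - j for j, c in enumerate(reversed(wave_string)) if active(c)), None)
--     return first_active, last_active
-- ===== Notes on version B (the rewrite author's own statement) =====
-- stated objective: simpler
-- what changed: Replaces A's single stateful loop carrying mutable first/last accumulators with two independent short-circuiting scans (forward for the first active index, backward over the reversed string for the last) sharing one active() predicate; the scans stop at the first hit instead of always traversing the whole string.
import Mathlib
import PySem

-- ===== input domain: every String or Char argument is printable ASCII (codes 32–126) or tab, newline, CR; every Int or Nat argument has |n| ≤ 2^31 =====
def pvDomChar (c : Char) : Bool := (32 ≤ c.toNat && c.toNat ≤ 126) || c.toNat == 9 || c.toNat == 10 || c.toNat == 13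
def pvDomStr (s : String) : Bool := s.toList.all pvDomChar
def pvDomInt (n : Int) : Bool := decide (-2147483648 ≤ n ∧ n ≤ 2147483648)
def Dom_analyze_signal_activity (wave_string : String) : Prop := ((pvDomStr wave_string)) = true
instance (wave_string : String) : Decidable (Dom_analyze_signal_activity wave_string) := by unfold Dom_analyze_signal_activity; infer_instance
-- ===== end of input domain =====

-- B replaces A's single stateful first/last-accumulator loop by two independent
-- short-circuiting scans (forward for first, backward over the reversed string for last);
-- objective: simpler.

-- ===== PORT A =====
-- the body of A's for-loop: both active branches update (first, last) the same way
def pvAStep (fc : Char) (st : Option Int × Option Int) (ic : Int × Char) : Option Int × Option Int :=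
  if ic.2 ≠ fc ∧ ic.2 ≠ '.' then
    ((match st.1 with | none => some ic.1 | some j => some j), some ic.1)
  else if ic.2 = 'p' ∨ ic.2 = 'n' ∨ ic.2 = 'P' ∨ ic.2 = 'N' then
    ((match st.1 with | none => some ic.1 | some j => some j), some ic.1)
  else st

def analyze_signal_activity (wave_string : String) : Option Int × Option Int :=
  match wave_string.toList with
  | [] => (none, none)
  | fc :: _ =>
    (PySem.List.enumerate wave_string.toList).foldl (pvAStep fc) (none, none)

-- ===== PORT B =====
-- active(c) = (c != first_char and c != '.') or c in 'pnPN'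
def pvActive (fc : Char) (c : Char) : Bool :=
  (c != fc && c != '.') || (c == 'p' || c == 'n' || c == 'P' || c == 'N')

def analyze_signal_activity_alt (wave_string : String) : Option Int × Option Int :=
  match wave_string.toList with
  | [] => (none, none)
  | fc :: _ =>
    let cs := wave_string.toList
    let n : Int := cs.length
    ((cs.findIdx? (pvActive fc)).map (fun i => (i : Int)),
     (cs.reverse.findIdx? (pvActive fc)).map (fun j => n - 1 - (j : Int)))

-- ===== PRECONDITION & SPEC =====
def Spec_analyze_signal_activity (wave_string : String) (out : Option Int × Option Int) : Prop := out = analyze_signal_activity_alt wave_string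
instance (wave_string : String) (out : Option Int × Option Int) : Decidable (Spec_analyze_signal_activity wave_string out) := by unfold Spec_analyze_signal_activity; infer_instance

-- ===== CLAIM (what is proved, stated in full; the proofs are below) =====
def Claim_equal_analyze_signal_activity : Prop := ∀ (wave_string : String), Dom_analyze_signal_activity wave_string → Spec_analyze_signal_activity wave_string (analyze_signal_activity wave_string)

-- ===== LEMMAS AND PROOFS =====

-- last active index of a list, by structural recursion (proof-side spec)
def pvLastIdx? (p : Char → Bool) : List Char → Option Nat
  | [] => none
  | c :: t =>
    match pvLastIdx? p t with
    | some j => some (j + 1)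
    | none => if p c then some 0 else none

theorem pvAStep_eq_if (fc : Char) (st : Option Int × Option Int) (ic : Int × Char) :
    pvAStep fc st ic =
      if pvActive fc ic.2 then
        ((match st.1 with | none => some ic.1 | some j => some j), some ic.1)
      else st := by
  simp only [pvAStep, pvActive, Bool.or_eq_true, Bool.and_eq_true, bne_iff_ne, beq_iff_eq]
  split_ifs <;> first | rfl | tauto

theorem portA_cons (w : String) (fc : Char) (rest : List Char) (h : w.toList = fc :: rest) :
    analyze_signal_activity w =
      (PySem.List.enumerate (fc :: rest)).foldl (pvAStep fc) (none, none) := by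
  unfold analyze_signal_activity
  rw [h]

theorem portB_cons (w : String) (fc : Char) (rest : List Char) (h : w.toList = fc :: rest) :
    analyze_signal_activity_alt w =
      (((fc :: rest).findIdx? (pvActive fc)).map (fun i => (i : Int)),
       ((fc :: rest).reverse.findIdx? (pvActive fc)).map
         (fun j => ((fc :: rest).length : Int) - 1 - (j : Int))) := by
  unfold analyze_signal_activity_alt
  rw [h]

-- loop invariant: A's fold computes first-hit (kept) and last-hit (overwritten)
theorem pvAloop_char (fc : Char) (cs : List Char) : ∀ (i0 : Int) (st : Option Int × Option Int),
    (PySem.List.enumerate cs i0).foldl (pvAStep fc) st =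
      ((match st.1 with
        | some j => some j
        | none => (cs.findIdx? (pvActive fc)).map (fun k => i0 + (k : Int))),
       (match pvLastIdx? (pvActive fc) cs with
        | some k => some (i0 + (k : Int))
        | none => st.2)) := by
  induction cs with
  | nil =>
    intro i0 st
    obtain ⟨f, l⟩ := st
    cases f <;> simp [PySem.List.enumerate_nil, pvLastIdx?]
  | cons c t ih =>
    intro i0 st
    rw [PySem.List.enumerate_cons, List.foldl_cons, ih, pvAStep_eq_if]
    obtain ⟨f, l⟩ := st
    by_cases hc : pvActive fc c <;>
      cases f <;>
        cases hlt : pvLastIdx? (pvActive fc) t <;>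
          cases hft : t.findIdx? (pvActive fc) <;>
            simp [hc, hlt, hft, pvLastIdx?, List.findIdx?_cons] <;>
              omega

-- backward-scan characterisation: last index via findIdx? on the reverse
theorem pvLastIdx_reverse (p : Char → Bool) (cs : List Char) :
    (cs.reverse.findIdx? p).map (fun j => ((cs.length : Int) - 1 - (j : Int))) =
      (pvLastIdx? p cs).map (fun k => (k : Int)) := by
  induction cs with
  | nil => rfl
  | cons c t ih =>
    simp only [List.reverse_cons, pvLastIdx?]
    rw [List.findIdx?_append]
    cases hrt : t.reverse.findIdx? p with
    | some j =>
      cases hlt : pvLastIdx? p t with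
      | none =>
        rw [hrt, hlt] at ih
        simp at ih
      | some k =>
        rw [hrt, hlt] at ih
        simp only [Option.orElse_some, hlt, List.length_cons]
        simp at ih ⊢
        omega
    | none =>
      have hlt : pvLastIdx? p t = none := by
        cases h : pvLastIdx? p t with
        | none => rfl
        | some k => rw [hrt, h] at ih; simp at ih
      simp only [hlt, List.findIdx?_cons, List.findIdx?_nil,
        List.length_reverse]
      by_cases hp : p c
      · simp [hp]
      · simp [hp]

-- ===== VERDICT (by name: the statement is the Claim_ definition above) =====
theorem analyze_signal_activity_spec : Claim_equal_analyze_signal_activity := by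
  intro w _
  unfold Spec_analyze_signal_activity
  rcases hl : w.toList with _ | ⟨fc, rest⟩
  · unfold analyze_signal_activity analyze_signal_activity_alt
    rw [hl]
  · rw [portA_cons w fc rest hl, portB_cons w fc rest hl, pvAloop_char]
    refine Prod.ext ?_ ?_
    · simp
    · have hrev := pvLastIdx_reverse (pvActive fc) (fc :: rest)
      rw [hrev]
      cases pvLastIdx? (pvActive fc) (fc :: rest) <;> simp
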